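-- pv_equiv track=rewrite | github.com/pypi-data/pypi-mirror-330 | packages/gperiod/gperiod-0.0.4-py3-none-any.whl/gperiod/g.py | _jumping_sequence
-- ===== SOURCE A (Python) =====
-- import typing as t
--
-- def _jumping_sequence(length: int) -> t.Generator[int, None, None]:
--     middle, tail = divmod(length, 2)
--     for left, right in zip(range(middle - 1, -1, -1),
--                            range(middle, length)):
--         yield left
--         yield right
--     if tail:
--         yield length - 1
-- ===== SOURCE B (Python) =====
-- import typing as t
--
-- def _jumping_sequence(length: int) -> t.Generator[int, None, None]:
--     # Rank each index by its distance from the middle (indices left of the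
--     # middle get even ranks, indices at/right of it odd ranks) and emit the
--     # indices in rank order.
--     middle = length // 2
--
--     def rank(i: int) -> int:
--         return 2 * (middle - 1 - i) if i < middle else 2 * (i - middle) + 1
--
--     yield from sorted(range(length), key=rank)
-- ===== Notes on version B (the rewrite author's own statement) =====
-- stated objective: alternative
-- what changed: Instead of zipping a descending and an ascending range and appending the odd tail, B assigns every index a scalar rank (even ranks for indices left of the middle, odd ranks at/right of it) and sorts range(length) by that rank.
-- intended difference: For negative odd lengths A yields the single bogus negative index length-1 (leftover of its odd-tail branch firing on a degenerate input) while B yields nothing, the intended result for any non-positive length. — e.g. on _jumping_sequence(-1): A returns [-2], B returns []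
import Mathlib
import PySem

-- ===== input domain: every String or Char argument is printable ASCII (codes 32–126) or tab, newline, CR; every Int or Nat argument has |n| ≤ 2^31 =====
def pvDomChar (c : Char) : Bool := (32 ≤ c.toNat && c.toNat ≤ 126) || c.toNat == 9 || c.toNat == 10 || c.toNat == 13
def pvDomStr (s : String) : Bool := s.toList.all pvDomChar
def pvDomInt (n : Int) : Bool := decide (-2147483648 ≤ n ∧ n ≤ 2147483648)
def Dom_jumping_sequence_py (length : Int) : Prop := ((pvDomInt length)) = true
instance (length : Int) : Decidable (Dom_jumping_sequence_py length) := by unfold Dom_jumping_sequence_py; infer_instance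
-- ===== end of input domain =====

-- B replaces A's zip of a descending and an ascending range (plus a trailing odd-tail yield) by
-- ranking every index by its distance from the middle and sorting range(length) by that rank
-- (objective: alternative).

-- ===== PORT A =====
def jumping_sequence_py (length : Int) : List Int :=
  let middle := PySem.Int.floordiv length 2
  let tail := PySem.Int.mod length 2
  (((PySem.List.pyRange (middle - 1) (-1) (-1)).zip
      (PySem.List.pyRange middle length 1)).flatMap (fun lr => [lr.1, lr.2]))
  ++ (if tail ≠ 0 then [length - 1] else [])

-- ===== PORT B =====
def jumping_sequence_py_alt (length : Int) : List Int :=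
  let middle := PySem.Int.floordiv length 2
  PySem.List.sorted (PySem.List.pyRange 0 length 1)
    (fun i => if i < middle then 2 * (middle - 1 - i) else 2 * (i - middle) + 1) false

-- ===== PRECONDITION & SPEC =====
-- For negative odd lengths A returns the single bogus negative index length-1 (its odd-tail
-- branch fires on a degenerate input) while B returns nothing, the intended result for any
-- non-positive length.
def D_jumping_sequence_py (length : Int) : Prop := length < 0 ∧ length % 2 ≠ 0
instance (length : Int) : Decidable (D_jumping_sequence_py length) := by
  unfold D_jumping_sequence_py; infer_instance

def Spec_jumping_sequence_py (length : Int) (out : List Int) : Prop :=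
  ¬ D_jumping_sequence_py length → out = jumping_sequence_py_alt length
instance (length : Int) (out : List Int) : Decidable (Spec_jumping_sequence_py length out) := by
  unfold Spec_jumping_sequence_py; infer_instance

def pvDiffWitness_jumping_sequence_py : Int := (-1)
def pvDiffWitnessOut_jumping_sequence_py : (List Int) × (List Int) := ([-2], [])

-- ===== CLAIM (what is proved, stated in full; the proofs are below) =====
def Claim_unchanged_jumping_sequence_py : Prop :=
  ∀ (length : Int), Dom_jumping_sequence_py length →
    Spec_jumping_sequence_py length (jumping_sequence_py length)
def Claim_changed_jumping_sequence_py : Prop :=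
  Dom_jumping_sequence_py (pvDiffWitness_jumping_sequence_py) ∧
  D_jumping_sequence_py (pvDiffWitness_jumping_sequence_py) ∧
  jumping_sequence_py (pvDiffWitness_jumping_sequence_py) = pvDiffWitnessOut_jumping_sequence_py.1 ∧
  jumping_sequence_py_alt (pvDiffWitness_jumping_sequence_py) = pvDiffWitnessOut_jumping_sequence_py.2 ∧
  pvDiffWitnessOut_jumping_sequence_py.1 ≠ pvDiffWitnessOut_jumping_sequence_py.2
def Claim_exact_jumping_sequence_py : Prop :=
  ∀ (length : Int), Dom_jumping_sequence_py length → D_jumping_sequence_py length →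
    jumping_sequence_py length ≠ jumping_sequence_py_alt length

-- ===== LEMMAS AND PROOFS =====

-- B's sort key, with Python floordiv unfolded to Int.ediv
def pvKey (L i : Int) : Int := if i < L / 2 then 2 * (L / 2 - 1 - i) else 2 * (i - L / 2) + 1

-- the index A emits at output position k (for L ≥ 0)
def pvPos (L k : Int) : Int :=
  if L % 2 ≠ 0 ∧ k = L - 1 then L - 1
  else if k % 2 = 0 then L / 2 - 1 - k / 2 else L / 2 + k / 2

-- range (2m) positions, grouped in consecutive pairs
theorem pvRangePairs (m : Nat) (g : Nat → Int) :
    (List.range (2*m)).map g = (List.range m).flatMap (fun i => [g (2*i), g (2*i+1)]) := by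
  induction m with
  | zero => simp
  | succ m ih =>
    have h2 : 2*(m+1) = (2*m + 1) + 1 := by ring
    rw [h2, List.range_succ, List.range_succ, List.range_succ]
    simp [ih]

theorem pvZipTrunc {a b : Type} (l1 : List a) (l2 r : List b) (h : l1.length = l2.length) :
    l1.zip (l2 ++ r) = l1.zip l2 := by
  conv_lhs => rw [← List.append_nil l1]
  rw [List.zip_append h]
  simp

-- A's output is the position map (characterisation of A, same interleave read off by position)
theorem pvA_eq_posMap (L : Int) (h : ¬ (L < 0 ∧ L % 2 ≠ 0)) :
    jumping_sequence_py L = (PySem.List.pyRange 0 L 1).map (pvPos L) := by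
  simp only [jumping_sequence_py,
    PySem.Int.floordiv_eq_ediv_of_pos (show (0:Int) < 2 by norm_num),
    PySem.Int.mod_eq_emod_of_pos (show (0:Int) < 2 by norm_num)]
  by_cases hneg : L < 0
  · have hmod : L % 2 = 0 := by
      by_contra hc
      exact h ⟨hneg, hc⟩
    rw [PySem.List.pyRange_neg_one_eq_nil (by omega),
        PySem.List.pyRange_one_eq_nil (show L ≤ L / 2 by omega),
        PySem.List.pyRange_one_eq_nil (show L ≤ 0 by omega)]
    simp [hmod]
  · rw [not_lt] at hneg
    lift L to Nat using hneg with n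
    rcases Nat.even_or_odd n with ⟨m, hm⟩ | ⟨m, hm⟩
    · -- even: n = m + m
      subst hm
      have hmid : ((m + m : Nat) : Int) / 2 = (m : Int) := by push_cast; omega
      have hmod : ((m + m : Nat) : Int) % 2 = 0 := by push_cast; omega
      rw [hmid, hmod]
      rw [PySem.List.pyRange_neg_one, PySem.List.pyRange_one, PySem.List.pyRange_one]
      rw [show ((m:Int) - 1 - (-1)).toNat = m by omega,
          show (((m + m : Nat) : Int) - (m:Int)).toNat = m by push_cast; omega,
          show (((m + m : Nat) : Int) - 0).toNat = 2*m by push_cast; omega]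
      rw [List.zip_map', List.flatMap_map, pvRangePairs, List.map_flatMap]
      simp only [ne_eq, not_true_eq_false, reduceIte, List.append_nil, List.map_cons,
        List.map_nil]
      apply List.flatMap_congr
      intro i _
      simp only [pvPos, List.cons.injEq, and_true]
      constructor <;> (split_ifs <;> (push_cast at *; omega))
    · -- odd: n = 2*m + 1
      subst hm
      have hmid : ((2*m + 1 : Nat) : Int) / 2 = (m : Int) := by push_cast; omega
      have hmod : ((2*m + 1 : Nat) : Int) % 2 = 1 := by push_cast; omega
      rw [hmid, hmod]
      rw [show ((2*m + 1 : Nat) : Int) = ((2*m : Nat) : Int) + 1 by push_cast; ring]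
      rw [PySem.List.pyRange_one_succ_right (show (m:Int) ≤ ((2*m:Nat):Int) by push_cast; omega)]
      rw [PySem.List.pyRange_neg_one, PySem.List.pyRange_one, PySem.List.pyRange_one]
      rw [show ((m:Int) - 1 - (-1)).toNat = m by omega,
          show (((2*m : Nat) : Int) - (m:Int)).toNat = m by push_cast; omega,
          show (((2*m : Nat) : Int) + 1 - 0).toNat = 2*m + 1 by push_cast; omega]
      rw [pvZipTrunc _ _ _ (by simp), List.zip_map', List.flatMap_map]
      simp only [List.range_succ, List.map_append]
      rw [pvRangePairs, List.map_flatMap]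
      simp only [List.map_cons, List.map_nil]
      rw [if_pos (show (1:Int) ≠ 0 by norm_num)]
      refine congrArg₂ (· ++ ·) ?_ ?_
      · apply List.flatMap_congr
        intro i hi
        rw [List.mem_range] at hi
        simp only [pvPos, List.cons.injEq, and_true]
        constructor <;> (split_ifs <;> (push_cast at *; omega))
      · have htl : (1:Int) ≠ 0 ∧ ((0:Int) + ((2*m : Nat) : Int)) = ((2*m:Nat):Int) + 1 - 1 := by
          constructor
          · norm_num
          · push_cast; ring
        norm_num [htl.2]
        unfold pvPos
        split_ifs <;> omega

-- the rank of the index A emits at position j is strictly monotone in j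
theorem pvKey_pos_mono (L j k : Int) (h0 : 0 ≤ j) (hjk : j < k) (hk : k < L) :
    pvKey L (pvPos L j) < pvKey L (pvPos L k) := by
  unfold pvKey pvPos
  split_ifs <;> omega

-- the index A emits at position k lies in [0, L)
theorem pvPos_range (L k : Int) (h0 : 0 ≤ k) (hk : k < L) :
    0 ≤ pvPos L k ∧ pvPos L k < L := by
  unfold pvPos
  split_ifs <;> omega

-- ===== VERDICT (by name: the statement is the Claim_ definition above) =====
theorem jumping_sequence_py_spec : Claim_unchanged_jumping_sequence_py := by
  intro L _ hD
  rw [pvA_eq_posMap L (by unfold D_jumping_sequence_py at hD; exact hD)]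
  simp only [jumping_sequence_py_alt,
    PySem.Int.floordiv_eq_ediv_of_pos (show (0:Int) < 2 by norm_num)]
  have hkey : (fun i => if i < L / 2 then 2 * (L / 2 - 1 - i) else 2 * (i - L / 2) + 1)
      = pvKey L := by
    funext i; rfl
  rw [hkey]
  -- the mapped list is strictly key-increasing
  have hpair : ((PySem.List.pyRange 0 L 1).map (pvPos L)).Pairwise
      (fun a b => pvKey L a < pvKey L b) := by
    rw [List.pairwise_map]
    refine (PySem.List.pairwise_lt_pyRange_one 0 L).imp_of_mem ?_
    intro a b ha hb hab
    rw [PySem.List.mem_pyRange_one] at ha hb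
    exact pvKey_pos_mono L a b ha.1 hab hb.2
  -- hence nodup, and a sub-permutation of the range of equal length, hence a permutation
  have hnd : ((PySem.List.pyRange 0 L 1).map (pvPos L)).Nodup :=
    hpair.imp (fun h => by intro he; rw [he] at h; omega)
  have hsub : ((PySem.List.pyRange 0 L 1).map (pvPos L)) ⊆ PySem.List.pyRange 0 L 1 := by
    intro x hx
    rw [List.mem_map] at hx
    obtain ⟨k, hk, rfl⟩ := hx
    rw [PySem.List.mem_pyRange_one] at hk ⊢
    exact pvPos_range L k hk.1 hk.2
  have hperm : ((PySem.List.pyRange 0 L 1).map (pvPos L)).Perm (PySem.List.pyRange 0 L 1) :=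
    (hnd.subperm hsub).perm_of_length_le (by simp)
  exact (PySem.List.sorted_eq_of_perm_of_pairwise_lt _ _ _ hperm hpair).symm
theorem jumping_sequence_py_changed : Claim_changed_jumping_sequence_py := by
  unfold Claim_changed_jumping_sequence_py; decide
theorem jumping_sequence_py_tight : Claim_exact_jumping_sequence_py := by
  intro L _ hD
  obtain ⟨hneg, hodd⟩ := hD
  simp only [jumping_sequence_py, jumping_sequence_py_alt,
    PySem.Int.floordiv_eq_ediv_of_pos (show (0:Int) < 2 by norm_num),
    PySem.Int.mod_eq_emod_of_pos (show (0:Int) < 2 by norm_num)]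
  rw [PySem.List.pyRange_neg_one_eq_nil (by omega),
      PySem.List.pyRange_one_eq_nil (show L ≤ L / 2 by omega),
      PySem.List.pyRange_one_eq_nil (show L ≤ 0 by omega)]
  simp [hodd, PySem.List.sorted]
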